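-- pv_equiv track=rewrite | github.com/FrootsieLoopsie/Bioinformatics-PLAST-Algorithm | bioinformatics_plast.py | recherche_exacte_kmers
-- ===== SOURCE A (Python) =====
-- def recherche_exacte_kmers(kmers, base_de_donnees):
--     """ Recherche chaque k-mer dans la base de données et renvoie les HSPs initiaux avec les positions dans sequence. """
--     HSPs = []
--     for seq_id, db_seq in base_de_donnees.items():
--         for kmer in kmers:
--             start_pos_db = db_seq.find(kmer)
--             while start_pos_db != -1:
--                 # Trouver la position correspondante dans 'sequence'
--                 end_pos_db = start_pos_db + len(kmer) - 1
--                 HSPs.append((seq_id, start_pos_db, end_pos_db, kmer))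
--                 start_pos_db = db_seq.find(kmer, start_pos_db + 1)
--     return HSPs
-- ===== SOURCE B (Python) =====
-- def recherche_exacte_kmers(kmers, base_de_donnees):
--     """One sliding-window scan per sequence and distinct k-mer length, with a hash-set
--     membership test, instead of a repeated str.find loop per k-mer; matches are
--     regrouped by k-mer afterwards to keep A's output order."""
--     kset = set(kmers)
--     lengths = sorted(set(len(k) for k in kmers))
--     HSPs = []
--     for seq_id, s in base_de_donnees.items():
--         n = len(s)
--         occ = {}
--         for i in range(n + 1):
--             for L in lengths:
--                 if i + L <= n:
--                     w = s[i:i+L]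
--                     if w in kset:
--                         occ.setdefault(w, []).append(i)
--         for kmer in kmers:
--             for i in occ.get(kmer, []):
--                 HSPs.append((seq_id, i, i + len(kmer) - 1, kmer))
--     return HSPs
-- ===== Notes on version B (the rewrite author's own statement) =====
-- stated objective: faster
-- what changed: Instead of running a repeated str.find loop for every k-mer over every sequence, B slides one window per distinct k-mer length across each sequence, tests the window against a hash set of the k-mers, groups hits in a dict keyed by k-mer, and then emits them in A's per-k-mer order.
import Mathlib
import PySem

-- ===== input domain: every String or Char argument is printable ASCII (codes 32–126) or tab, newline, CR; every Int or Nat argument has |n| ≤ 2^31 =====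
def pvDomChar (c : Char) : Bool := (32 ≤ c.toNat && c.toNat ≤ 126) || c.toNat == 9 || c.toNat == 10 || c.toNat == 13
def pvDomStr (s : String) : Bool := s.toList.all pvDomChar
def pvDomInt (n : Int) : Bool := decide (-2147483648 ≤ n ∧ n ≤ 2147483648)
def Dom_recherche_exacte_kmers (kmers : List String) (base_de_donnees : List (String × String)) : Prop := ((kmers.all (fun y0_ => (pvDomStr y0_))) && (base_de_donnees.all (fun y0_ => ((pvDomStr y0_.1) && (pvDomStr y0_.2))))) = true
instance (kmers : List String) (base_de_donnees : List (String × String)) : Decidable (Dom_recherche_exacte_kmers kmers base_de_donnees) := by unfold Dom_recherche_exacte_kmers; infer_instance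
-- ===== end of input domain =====

-- B replaces A's per-k-mer repeated str.find loop by one sliding-window scan per sequence
-- and distinct k-mer length with a hash-set membership test, regrouping matches per k-mer;
-- equivalence of the return value is proved on the whole domain (no Pre_; A is total).

-- ===== PORT A =====
-- the 'while start_pos_db != -1' loop; fuel (a totality guard only) bounds the
-- iteration count: each found position is strictly larger than the previous one.
def pvGoFindA (seq_id kmer db_seq : String) (acc : List (String × Int × Int × String))
    (start : Int) : Nat → List (String × Int × Int × String)
  | 0 => acc
  | fuel + 1 =>
    if start ≠ -1 then
      pvGoFindA seq_id kmer db_seq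
        (acc ++ [(seq_id, start, start + PySem.Str.len kmer - 1, kmer)])
        (PySem.Str.findFrom db_seq kmer (start + 1)) fuel
    else acc

def recherche_exacte_kmers (kmers : List String) (base_de_donnees : List (String × String)) : List (String × Int × Int × String) :=
  -- the Python receives base_de_donnees as a dict: build it (insertion order, overwrite in place)
  let d : PySem.Dict String String := base_de_donnees.foldl (fun d p => d.insert p.1 p.2) PySem.Dict.empty
  d.items.foldl (fun HSPs p =>
    kmers.foldl (fun HSPs kmer =>
      pvGoFindA p.1 kmer p.2 HSPs (PySem.Str.find p.2 kmer) (p.2.toList.length + 2)) HSPs) []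

-- ===== PORT B =====
-- the per-sequence scan: for i in range(n+1): for L in lengths: if i+L<=n and s[i:i+L] in kset: occ.setdefault(w,[]).append(i)
-- (setdefault(w, []).append(i) is Dict.modify w [] (· ++ [i]): d[w] = d.get(w, []) + [i] at w's position)
def pvScanB (kset : PySem.Set String) (lengths : List Int) (s : String) : PySem.Dict String (List Int) :=
  (PySem.List.pyRange 0 (PySem.Str.len s + 1) 1).foldl (fun occ i =>
    lengths.foldl (fun occ L =>
      if i + L ≤ PySem.Str.len s then
        let w := PySem.Str.slice s (some i) (some (i + L))
        if PySem.Set.contains kset w then occ.modify w [] (· ++ [i]) else occ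
      else occ) occ) PySem.Dict.empty

def recherche_exacte_kmers_alt (kmers : List String) (base_de_donnees : List (String × String)) : List (String × Int × Int × String) :=
  let kset : PySem.Set String := PySem.Set.ofList kmers
  let lengths : List Int := PySem.List.sorted (PySem.Set.ofList (kmers.map PySem.Str.len)) (fun x => x)
  let d : PySem.Dict String String := base_de_donnees.foldl (fun d p => d.insert p.1 p.2) PySem.Dict.empty
  d.items.foldl (fun HSPs p =>
    let occ := pvScanB kset lengths p.2
    kmers.foldl (fun HSPs kmer =>
      (occ.getD kmer []).foldl (fun HSPs i =>
        HSPs ++ [(p.1, i, i + PySem.Str.len kmer - 1, kmer)]) HSPs) HSPs) []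

-- ===== PRECONDITION & SPEC =====
def Spec_recherche_exacte_kmers (kmers : List String) (base_de_donnees : List (String × String)) (out : List (String × Int × Int × String)) : Prop := out = recherche_exacte_kmers_alt kmers base_de_donnees
instance (kmers : List String) (base_de_donnees : List (String × String)) (out : List (String × Int × Int × String)) : Decidable (Spec_recherche_exacte_kmers kmers base_de_donnees out) := by unfold Spec_recherche_exacte_kmers; infer_instance

-- ===== CLAIM (what is proved, stated in full; the proofs are below) =====
def Claim_equal_recherche_exacte_kmers : Prop := ∀ (kmers : List String) (base_de_donnees : List (String × String)), Dom_recherche_exacte_kmers kmers base_de_donnees → Spec_recherche_exacte_kmers kmers base_de_donnees (recherche_exacte_kmers kmers base_de_donnees)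

-- ===== LEMMAS AND PROOFS =====

-- occurrence positions of ks in cs, in increasing order (i = cs.length included: the empty k-mer)
def pvOcc (cs ks : List Char) : List Nat :=
  (List.range (cs.length + 1)).filter (fun i => decide (ks <+: cs.drop i))

-- the tuple emitted for k-mer k of sequence sid at position i
def pvTup (sid k : String) (i : Nat) : String × Int × Int × String :=
  (sid, (i : Int), (i : Int) + (k.toList.length : Int) - 1, k)

lemma pv_findFrom_top (cs ks : List Char) :
    PySem.Chars.findFrom cs ks ((cs.length : Int) + 1) = -1 := by
  unfold PySem.Chars.findFrom
  have h1 : ¬ ((cs.length : Int) + 1 < 0) := by omega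
  simp only [h1, if_false]
  rw [if_pos (by omega)]

lemma pv_filter_congr_ge {m p r : Nat} (q : Nat → Bool) (hpr : p ≤ r)
    (hmin : ∀ i, p ≤ i → i < r → q i = false) :
    (List.range m).filter (fun i => decide (p ≤ i) && q i)
      = (List.range m).filter (fun i => decide (r ≤ i) && q i) := by
  apply List.filter_congr
  intro i _
  by_cases h1 : r ≤ i
  · have h2 : p ≤ i := le_trans hpr h1
    simp [h1, h2]
  · by_cases h2 : p ≤ i
    · have h3 := hmin i h2 (by omega)
      simp [h1, h2, h3]
    · simp [h1, h2]

lemma pv_filter_step (m r : Nat) (q : Nat → Bool) (hr : q r = true) (hrm : r < m) :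
    (List.range m).filter (fun i => decide (r ≤ i) && q i)
      = r :: (List.range m).filter (fun i => decide (r + 1 ≤ i) && q i) := by
  induction m with
  | zero => omega
  | succ m ih =>
    rcases Nat.lt_succ_iff_lt_or_eq.mp hrm with h | h
    · rw [List.range_succ, List.filter_append, List.filter_append, ih h]
      have h1 : (decide (r ≤ m) && q m) = q m := by
        have : decide (r ≤ m) = true := by simp; omega
        rw [this, Bool.true_and]
      have h2 : (decide (r + 1 ≤ m) && q m) = q m := by
        have : decide (r + 1 ≤ m) = true := by simp; omega
        rw [this, Bool.true_and]
      rw [List.filter_singleton, List.filter_singleton, h1, h2, List.cons_append]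
    · subst h
      rw [List.range_succ, List.filter_append, List.filter_append]
      have e1 : (List.range r).filter (fun i => decide (r ≤ i) && q i) = [] := by
        rw [List.filter_eq_nil_iff]
        intro i hi
        simp only [List.mem_range] at hi
        simp only [Bool.and_eq_true, decide_eq_true_eq, not_and]
        intro h'; omega
      have e2 : (List.range r).filter (fun i => decide (r + 1 ≤ i) && q i) = [] := by
        rw [List.filter_eq_nil_iff]
        intro i hi
        simp only [List.mem_range] at hi
        simp only [Bool.and_eq_true, decide_eq_true_eq, not_and]
        intro h'; omega
      rw [e1, e2]
      simp [hr]

-- a prefix somewhere to the right of p is an infix of the suffix at p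
lemma pv_prefix_drop_infix {cs ks : List Char} {p i : Nat} (hpi : p ≤ i)
    (h : ks <+: cs.drop i) : ks <:+: cs.drop p := by
  have hd : cs.drop i = List.drop (i - p) (cs.drop p) := by
    rw [List.drop_drop]; congr 1; omega
  rw [hd] at h
  exact h.isInfix.trans (List.drop_suffix _ _).isInfix

-- A's while loop, started at search position p, appends exactly the occurrences ≥ p
lemma pvGoFindA_from (sid k db : String) (p : Nat)
    (hp : p ≤ db.toList.length + 1) (fuel : Nat)
    (hf : db.toList.length + 2 - p ≤ fuel) (acc : List (String × Int × Int × String)) :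
    pvGoFindA sid k db acc (PySem.Chars.findFrom db.toList k.toList (p : Int)) fuel
      = acc ++ (((List.range (db.toList.length + 1)).filter
          (fun i => decide (p ≤ i) && decide (k.toList <+: db.toList.drop i))).map (pvTup sid k)) := by
  induction fuel generalizing p acc with
  | zero => omega
  | succ fuel ih =>
    by_cases hp' : p = db.toList.length + 1
    · subst hp'
      have htop : PySem.Chars.findFrom db.toList k.toList ((db.toList.length + 1 : Nat) : Int) = -1 := by
        push_cast
        exact pv_findFrom_top db.toList k.toList
      rw [htop]
      have hnil : (List.range (db.toList.length + 1)).filter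
          (fun i => decide (db.toList.length + 1 ≤ i) && decide (k.toList <+: db.toList.drop i)) = [] := by
        rw [List.filter_eq_nil_iff]
        intro i hi
        simp only [List.mem_range] at hi
        simp only [Bool.and_eq_true, decide_eq_true_eq, not_and]
        intro h'; omega
      rw [hnil]
      simp [pvGoFindA]
    · have hpn : p ≤ db.toList.length := by omega
      by_cases h0 : PySem.Chars.findFrom db.toList k.toList (p : Int) = -1
      · rw [h0]
        have hinf := (PySem.Chars.findFrom_natCast_eq_neg_one_iff db.toList k.toList p hpn).mp h0
        have hnil : (List.range (db.toList.length + 1)).filter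
            (fun i => decide (p ≤ i) && decide (k.toList <+: db.toList.drop i)) = [] := by
          rw [List.filter_eq_nil_iff]
          intro i hi
          simp only [Bool.and_eq_true, decide_eq_true_eq, not_and]
          intro h1 h2
          exact hinf (pv_prefix_drop_infix h1 h2)
        rw [hnil]
        simp [pvGoFindA]
      · -- a match was found
        have hspec := PySem.Chars.findFrom_natCast_spec db.toList k.toList p hpn h0
        set r := PySem.Chars.findFrom db.toList k.toList (p : Int) with hrdef
        have hfm := PySem.Chars.findFrom_natCast db.toList k.toList p hpn
        have hfind : PySem.Chars.find (db.toList.drop p) k.toList ≠ -1 := by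
          intro hc; rw [hc] at hfm; simp at hfm; exact h0 hfm
        have hrval : r = (p : Int) + PySem.Chars.find (db.toList.drop p) k.toList := by
          rw [hrdef, hfm, if_neg hfind]
        have hr0 : (0 : Int) ≤ r := by
          have := PySem.Chars.neg_one_le_find (db.toList.drop p) k.toList
          have hne : PySem.Chars.find (db.toList.drop p) k.toList ≠ -1 := hfind
          omega
        have hrn : r ≤ (db.toList.length : Int) := by
          have h1 := PySem.Chars.find_le_length (db.toList.drop p) k.toList
          rw [List.length_drop] at h1
          omega
        set j := r.toNat with hjdef
        have hjr : (j : Int) = r := Int.toNat_of_nonneg hr0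
        have hpj : p ≤ j := by
          have := hspec.1
          omega
        have hjn : j ≤ db.toList.length := by omega
        have hpref : k.toList <+: db.toList.drop j := hspec.2.1
        have hmin := hspec.2.2
        -- unfold one loop iteration
        have hstep : pvGoFindA sid k db acc r (fuel + 1)
            = pvGoFindA sid k db (acc ++ [(sid, r, r + PySem.Str.len k - 1, k)])
                (PySem.Str.findFrom db k (r + 1)) fuel := by
          rw [pvGoFindA]
          rw [if_pos (by omega)]
        rw [hstep]
        have hcast : r + 1 = ((j + 1 : Nat) : Int) := by push_cast; omega
        have hff : PySem.Str.findFrom db k (r + 1)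
            = PySem.Chars.findFrom db.toList k.toList ((j + 1 : Nat) : Int) := by
          rw [PySem.Str.findFrom_eq, hcast]
        rw [hff]
        rw [ih (j + 1) (by omega) (by omega)]
        -- now reassemble the filtered list
        have hcongr := pv_filter_congr_ge (m := db.toList.length + 1) (p := p) (r := j)
          (fun i => decide (k.toList <+: db.toList.drop i)) hpj
          (by intro i h1 h2; simp only [decide_eq_false_iff_not]; exact hmin i h1 h2)
        have hstep2 := pv_filter_step (db.toList.length + 1) j
          (fun i => decide (k.toList <+: db.toList.drop i)) (by simp [hpref]) (by omega)
        rw [hcongr, hstep2]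
        have htup : (sid, r, r + PySem.Str.len k - 1, k) = pvTup sid k j := by
          rw [pvTup, PySem.Str.len_eq]
          rw [← hjr]
        rw [htup]
        simp

lemma pvGoFindA_spec (sid k db : String) (acc : List (String × Int × Int × String)) :
    pvGoFindA sid k db acc (PySem.Str.find db k) (db.toList.length + 2)
      = acc ++ (pvOcc db.toList k.toList).map (pvTup sid k) := by
  have h0 : PySem.Str.find db k = PySem.Chars.findFrom db.toList k.toList ((0 : Nat) : Int) := by
    rw [PySem.Str.find_eq]
    simp
  rw [h0, pvGoFindA_from sid k db 0 (by omega) _ (by omega)]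
  have he : ((List.range (db.toList.length + 1)).filter
      (fun i => decide (0 ≤ i) && decide (k.toList <+: db.toList.drop i)))
      = pvOcc db.toList k.toList := by
    rw [pvOcc]
    apply List.filter_congr
    intro i _
    simp
  rw [he]


lemma pv_slice_toList (s : String) (j Lt : Nat) :
    (PySem.Str.slice s (some (j : Int)) (some ((j : Int) + (Lt : Int)))).toList
      = (s.toList.drop j).take Lt := by
  rw [PySem.Str.toList_slice, PySem.Chars.slice_eq_listSlice]
  rw [show ((j : Int) + (Lt : Int)) = ((j + Lt : Nat) : Int) by push_cast; ring]
  rw [PySem.List.slice_natCast]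
  congr 1
  omega

-- one window position j: the inner loop over the distinct lengths appends j at key k
-- exactly if k occurs at j (and leaves key k alone otherwise)
lemma pv_inner (kmers : List String) (s k : String) (hk : k ∈ kmers) (j : Nat)
    (hj : j ≤ s.toList.length) :
    ∀ (l : List Int), l.Nodup → (∀ L ∈ l, ∃ k' ∈ kmers, L = PySem.Str.len k') →
    ∀ occ : PySem.Dict String (List Int),
    (l.foldl (fun occ L =>
        if (j : Int) + L ≤ PySem.Str.len s then
          if PySem.Set.contains (PySem.Set.ofList kmers)
              (PySem.Str.slice s (some (j : Int)) (some ((j : Int) + L))) = true then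
            occ.modify (PySem.Str.slice s (some (j : Int)) (some ((j : Int) + L))) [] (· ++ [(j : Int)])
          else occ
        else occ) occ).getD k []
      = occ.getD k []
          ++ (if PySem.Str.len k ∈ l ∧ k.toList <+: s.toList.drop j then [(j : Int)] else []) := by
  intro l
  induction l with
  | nil =>
    intro _ _ occ
    simp
  | cons L t ih =>
    intro hnd hall occ
    obtain ⟨hLt, hndt⟩ := List.nodup_cons.mp hnd
    obtain ⟨k', hk', hLval⟩ := hall L (List.mem_cons_self)
    have hallt : ∀ L' ∈ t, ∃ k'' ∈ kmers, L' = PySem.Str.len k'' :=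
      fun L' h => hall L' (List.mem_cons_of_mem _ h)
    rw [List.foldl_cons]
    by_cases hLk : L = PySem.Str.len k
    · -- head length is k's length; the tail never touches it again
      have htn : PySem.Str.len k ∉ t := by rw [← hLk]; exact hLt
      rw [ih hndt hallt]
      have hteq : (if PySem.Str.len k ∈ t ∧ k.toList <+: s.toList.drop j then [(j : Int)] else [])
          = ([] : List Int) := if_neg (fun h => htn h.1)
      rw [hteq, List.append_nil]
      have hcons : (if PySem.Str.len k ∈ L :: t ∧ k.toList <+: s.toList.drop j then [(j : Int)] else [])
          = (if k.toList <+: s.toList.drop j then [(j : Int)] else []) := by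
        by_cases h : k.toList <+: s.toList.drop j
        · rw [if_pos ⟨by rw [← hLk]; exact List.mem_cons_self, h⟩, if_pos h]
        · rw [if_neg (fun hx => h hx.2), if_neg h]
      rw [hcons]
      have hLlen : L = ((k.toList.length : Nat) : Int) := by rw [hLk, PySem.Str.len_eq]
      rw [hLlen]
      by_cases hc : (j : Int) + ((k.toList.length : Nat) : Int) ≤ PySem.Str.len s
      · rw [if_pos hc]
        by_cases hw : (s.toList.drop j).take k.toList.length = k.toList
        · have hwk : PySem.Str.slice s (some (j : Int)) (some ((j : Int) + ((k.toList.length : Nat) : Int))) = k := by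
            apply String.toList_inj.mp
            rw [pv_slice_toList]
            exact hw
          rw [hwk]
          have hcont : PySem.Set.contains (PySem.Set.ofList kmers) k = true :=
            (PySem.Set.contains_iff _ _).mpr ((PySem.Set.mem_ofList _ _).mpr hk)
          rw [if_pos hcont, PySem.Dict.getD_modify_self]
          have hpref : k.toList <+: s.toList.drop j := by
            rw [← hw]
            exact List.take_prefix _ _
          rw [if_pos hpref]
        · have hpref : ¬ k.toList <+: s.toList.drop j := by
            intro h
            exact hw ((List.prefix_iff_eq_take.mp h).symm)
          have hne : k ≠ PySem.Str.slice s (some (j : Int)) (some ((j : Int) + ((k.toList.length : Nat) : Int))) := by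
            intro h
            apply hw
            rw [← pv_slice_toList s j k.toList.length, ← h]
          rw [if_neg hpref, List.append_nil]
          split
          · rw [PySem.Dict.getD_modify_of_ne _ _ _ hne]
          · rfl
      · rw [if_neg hc]
        have hpref : ¬ k.toList <+: s.toList.drop j := by
          intro h
          have hle := h.length_le
          rw [List.length_drop] at hle
          rw [PySem.Str.len_eq] at hc
          omega
        rw [if_neg hpref, List.append_nil]
    · -- head length is not k's length: key k untouched, recurse
      have hstep : ∀ occ' : PySem.Dict String (List Int),
          ((if (j : Int) + L ≤ PySem.Str.len s then
            if PySem.Set.contains (PySem.Set.ofList kmers)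
                (PySem.Str.slice s (some (j : Int)) (some ((j : Int) + L))) = true then
              occ'.modify (PySem.Str.slice s (some (j : Int)) (some ((j : Int) + L))) [] (· ++ [(j : Int)])
            else occ'
          else occ') : PySem.Dict String (List Int)).getD k [] = occ'.getD k [] := by
        intro occ'
        by_cases hc : (j : Int) + L ≤ PySem.Str.len s
        · rw [if_pos hc]
          have hL0 : L = ((k'.toList.length : Nat) : Int) := by rw [hLval, PySem.Str.len_eq]
          have hne : k ≠ PySem.Str.slice s (some (j : Int)) (some ((j : Int) + L)) := by
            intro h
            apply hLk
            have hlen : (PySem.Str.slice s (some (j : Int)) (some ((j : Int) + L))).toList.length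
                = k'.toList.length := by
              rw [hL0, pv_slice_toList, List.length_take, List.length_drop]
              rw [hL0, PySem.Str.len_eq] at hc
              omega
            rw [← h] at hlen
            rw [hLval, PySem.Str.len_eq, PySem.Str.len_eq, hlen]
          split
          · rw [PySem.Dict.getD_modify_of_ne _ _ _ hne]
          · rfl
        · rw [if_neg hc]
      rw [ih hndt hallt]
      rw [hstep occ]
      have hmem2 : (if PySem.Str.len k ∈ L :: t ∧ k.toList <+: s.toList.drop j then [(j : Int)] else [])
          = (if PySem.Str.len k ∈ t ∧ k.toList <+: s.toList.drop j then [(j : Int)] else []) := by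
        by_cases h : PySem.Str.len k ∈ t ∧ k.toList <+: s.toList.drop j
        · rw [if_pos ⟨List.mem_cons_of_mem _ h.1, h.2⟩, if_pos h]
        · rw [if_neg (by
            rintro ⟨h1, h2⟩
            rcases List.mem_cons.mp h1 with hx | hx
            · exact hLk hx.symm
            · exact h ⟨hx, h2⟩), if_neg h]
      rw [hmem2]

-- the whole scan, window by window
lemma pv_outer (kmers : List String) (s k : String) (hk : k ∈ kmers)
    (lengths : List Int) (hnd : lengths.Nodup)
    (hall : ∀ L ∈ lengths, ∃ k' ∈ kmers, L = PySem.Str.len k')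
    (hmemk : PySem.Str.len k ∈ lengths) :
    ∀ (js : List Nat), (∀ j ∈ js, j ≤ s.toList.length) →
    ∀ occ : PySem.Dict String (List Int),
    (js.foldl (fun (occ : PySem.Dict String (List Int)) (j : Nat) => lengths.foldl (fun occ L =>
        if (j : Int) + L ≤ PySem.Str.len s then
          if PySem.Set.contains (PySem.Set.ofList kmers)
              (PySem.Str.slice s (some (j : Int)) (some ((j : Int) + L))) = true then
            occ.modify (PySem.Str.slice s (some (j : Int)) (some ((j : Int) + L))) [] (· ++ [(j : Int)])
          else occ
        else occ) occ) occ).getD k []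
      = occ.getD k []
          ++ ((js.filter (fun j => decide (k.toList <+: s.toList.drop j))).map (fun (j : Nat) => (j : Int))) := by
  intro js
  induction js with
  | nil =>
    intro _ occ
    simp
  | cons j t iht =>
    intro hb occ
    rw [List.foldl_cons, iht (fun x hx => hb x (List.mem_cons_of_mem _ hx))]
    rw [pv_inner kmers s k hk j (hb j List.mem_cons_self) lengths hnd hall occ]
    rw [List.filter_cons]
    by_cases hpref : k.toList <+: s.toList.drop j
    · rw [if_pos ⟨hmemk, hpref⟩, if_pos (by simpa using hpref)]
      simp
    · rw [if_neg (fun h => hpref h.2), if_neg (by simpa using hpref)]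
      simp

-- B's scan dict at key k (k a member of kmers) holds exactly the occurrence positions
lemma pvScanB_getD (kmers : List String) (s k : String) (hk : k ∈ kmers) :
    (pvScanB (PySem.Set.ofList kmers)
        (PySem.List.sorted (PySem.Set.ofList (kmers.map PySem.Str.len)) (fun x => x)) s).getD k []
      = (pvOcc s.toList k.toList).map (fun (i : Nat) => (i : Int)) := by
  set lengths := PySem.List.sorted (PySem.Set.ofList (kmers.map PySem.Str.len)) (fun x => x) with hldef
  have hmem : ∀ L, L ∈ lengths ↔ L ∈ kmers.map PySem.Str.len := by
    intro L
    rw [hldef, PySem.List.mem_sorted, PySem.Set.mem_ofList]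
  have hnd : lengths.Nodup := by
    rw [hldef]
    exact (PySem.List.sorted_perm _ _ _).nodup_iff.mpr (PySem.Set.nodup_ofList _)
  have hall : ∀ L ∈ lengths, ∃ k' ∈ kmers, L = PySem.Str.len k' := by
    intro L hL
    obtain ⟨k', hk', he⟩ := List.mem_map.mp ((hmem L).mp hL)
    exact ⟨k', hk', he.symm⟩
  have hmemk : PySem.Str.len k ∈ lengths := (hmem _).mpr (List.mem_map_of_mem hk)
  have haux := pv_outer kmers s k hk lengths hnd hall hmemk
      (List.range (s.toList.length + 1))
      (by intro j hj; rw [List.mem_range] at hj; omega)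
      PySem.Dict.empty
  rw [PySem.Dict.getD_empty, List.nil_append] at haux
  unfold pvScanB
  rw [show PySem.Str.len s + 1 = ((s.toList.length + 1 : Nat) : Int) by
        rw [PySem.Str.len_eq]; push_cast; ring,
    PySem.List.pyRange_zero_natCast, List.foldl_map]
  rw [pvOcc]
  exact haux

-- emitting loop: appending one tuple per position is an append of a map
lemma pv_foldl_emit {α β : Type} (f : α → β) :
    ∀ (l : List α) (acc : List β), l.foldl (fun a i => a ++ [f i]) acc = acc ++ l.map f := by
  intro l
  induction l with
  | nil => intro acc; simp
  | cons x t ih =>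
    intro acc
    rw [List.foldl_cons, ih, List.map_cons]
    simp

-- the per-sequence inner loop over the k-mers agrees between A and B
lemma pv_kmers_fold (kmers : List String) (sid dbs : String) :
    ∀ (ks : List String), (∀ x ∈ ks, x ∈ kmers) →
    ∀ acc : List (String × Int × Int × String),
    ks.foldl (fun HSPs kmer =>
        pvGoFindA sid kmer dbs HSPs (PySem.Str.find dbs kmer) (dbs.toList.length + 2)) acc
      = ks.foldl (fun HSPs kmer =>
          ((pvScanB (PySem.Set.ofList kmers)
              (PySem.List.sorted (PySem.Set.ofList (kmers.map PySem.Str.len)) (fun x => x)) dbs).getD kmer []).foldl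
            (fun HSPs i => HSPs ++ [(sid, i, i + PySem.Str.len kmer - 1, kmer)]) HSPs) acc := by
  intro ks
  induction ks with
  | nil => intro _ acc; rfl
  | cons k t ih =>
    intro hsub acc
    rw [List.foldl_cons, List.foldl_cons]
    rw [pvGoFindA_spec, pv_foldl_emit, pvScanB_getD kmers dbs k (hsub k List.mem_cons_self)]
    rw [List.map_map]
    have hfun : ((fun i => (sid, i, i + PySem.Str.len k - 1, k)) ∘ (fun (i : Nat) => (i : Int)))
        = pvTup sid k := by
      funext i
      simp [pvTup, PySem.Str.len_eq]
    rw [hfun]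
    exact ih (fun x hx => hsub x (List.mem_cons_of_mem _ hx)) _

-- the outer loop over the database items, step by step
lemma pv_items_fold (kmers : List String) :
    ∀ (l : List (String × String)) (acc : List (String × Int × Int × String)),
    l.foldl (fun HSPs p => kmers.foldl (fun HSPs kmer =>
        pvGoFindA p.1 kmer p.2 HSPs (PySem.Str.find p.2 kmer) (p.2.toList.length + 2)) HSPs) acc
      = l.foldl (fun HSPs p => kmers.foldl (fun HSPs kmer =>
          ((pvScanB (PySem.Set.ofList kmers)
              (PySem.List.sorted (PySem.Set.ofList (kmers.map PySem.Str.len)) (fun x => x)) p.2).getD kmer []).foldl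
            (fun HSPs i => HSPs ++ [(p.1, i, i + PySem.Str.len kmer - 1, kmer)]) HSPs) HSPs) acc := by
  intro l
  induction l with
  | nil => intro acc; rfl
  | cons p t ih =>
    intro acc
    rw [List.foldl_cons, List.foldl_cons]
    rw [pv_kmers_fold kmers p.1 p.2 kmers (fun x h => h) acc]
    exact ih _

-- ===== VERDICT (by name: the statement is the Claim_ definition above) =====
theorem recherche_exacte_kmers_spec : Claim_equal_recherche_exacte_kmers := by
  intro kmers bdd _
  unfold Spec_recherche_exacte_kmers
  simp only [recherche_exacte_kmers, recherche_exacte_kmers_alt]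
  exact pv_items_fold kmers _ []
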